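-- pv_equiv track=rewrite | github.com/dmb225/algorithms | source/strings/reverse_alphanum.py | reverse_alpha
-- ===== SOURCE A (Python) =====
-- def reverse_alpha(str_in: str) -> str:
--     """
--     :param str_in: a str
--     :return: a str where str_in alpha characters are reversed
--     """
--     lst = [c for c in str_in]
--     i = 0
--     k = len(lst) - 1
--     while i < k:
--         if not lst[i].isalnum():
--             i += 1
--             continue
--         if not lst[k].isalnum():
--             k -= 1
--             continue
--         lst[i], lst[k] = lst[k], lst[i]
--         i += 1
--         k -= 1
--     return ''.join(lst)
-- ===== SOURCE B (Python) =====
-- def reverse_alpha(str_in: str) -> str: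
--     rev = [c for c in str_in if c.isalnum()]
--     rev.reverse()
--     out = []
--     j = 0
--     for c in str_in:
--         if c.isalnum():
--             out.append(rev[j])
--             j += 1
--         else:
--             out.append(c)
--     return ''.join(out)
-- ===== Notes on version B (the rewrite author's own statement) =====
-- stated objective: simpler
-- what changed: Replaced the in-place two-pointer swap loop with a filter-reverse-refill: collect the alphanumeric chars, reverse that list, then rebuild the string in one forward pass taking non-alnum chars as-is and alnum slots from the reversed list.
import Mathlib
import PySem

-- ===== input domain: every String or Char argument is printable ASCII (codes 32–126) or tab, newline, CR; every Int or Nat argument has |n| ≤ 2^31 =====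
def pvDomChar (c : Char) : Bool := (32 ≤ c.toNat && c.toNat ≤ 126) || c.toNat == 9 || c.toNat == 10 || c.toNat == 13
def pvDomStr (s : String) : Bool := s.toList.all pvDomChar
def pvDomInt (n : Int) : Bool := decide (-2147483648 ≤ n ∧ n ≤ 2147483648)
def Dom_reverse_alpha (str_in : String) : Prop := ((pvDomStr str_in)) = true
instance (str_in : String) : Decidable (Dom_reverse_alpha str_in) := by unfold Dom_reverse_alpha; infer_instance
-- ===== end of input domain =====

-- B replaces A's in-place two-pointer swap loop by a simpler filter-reverse-refill pass; return value only, same O(n).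

-- ===== PORT A =====
-- A's while loop: i,k are always in range when read/written (0 ≤ i < k ≤ len-1);
-- k = len-1 in Nat coincides with Python's int k except for the empty string, where
-- the loop body never runs in either semantics (i < k fails both for k = -1 and k = 0).
def reverse_alpha_loop (l : List Char) (i k : Nat) : List Char :=
  if _h : i < k then
    if ¬ (PySem.Chars.isalnum l[i]!) then reverse_alpha_loop l (i+1) k
    else if ¬ (PySem.Chars.isalnum l[k]!) then reverse_alpha_loop l i (k-1)
    else reverse_alpha_loop ((l.set i l[k]!).set k l[i]!) (i+1) (k-1)
  else l
termination_by k - i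
decreasing_by all_goals omega

def reverse_alpha (str_in : String) : String :=
  String.ofList (reverse_alpha_loop str_in.toList 0 (str_in.toList.length - 1))

-- ===== PORT B =====
-- forward pass: keep non-alnum chars, fill alnum slots from rs (rs never runs dry on real calls)
def reverse_alpha_fill : List Char → List Char → List Char
  | [], _ => []
  | c :: cs, rs =>
    if PySem.Chars.isalnum c then
      match rs with
      | r :: rs' => r :: reverse_alpha_fill cs rs'
      | [] => c :: reverse_alpha_fill cs []   -- unreachable: rs has exactly one char per alnum slot
    else c :: reverse_alpha_fill cs rs

def reverse_alpha_alt (str_in : String) : String :=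
  String.ofList (reverse_alpha_fill str_in.toList ((str_in.toList.filter PySem.Chars.isalnum).reverse))

-- ===== PRECONDITION & SPEC =====
def Spec_reverse_alpha (str_in : String) (out : String) : Prop := out = reverse_alpha_alt str_in
instance (str_in : String) (out : String) : Decidable (Spec_reverse_alpha str_in out) := by unfold Spec_reverse_alpha; infer_instance

-- ===== CLAIM (what is proved, stated in full; the proofs are below) =====
def Claim_equal_reverse_alpha : Prop := ∀ (str_in : String), Dom_reverse_alpha str_in → Spec_reverse_alpha str_in (reverse_alpha str_in)

-- ===== LEMMAS AND PROOFS =====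

lemma fill_append (xs ys rs ss : List Char)
    (h : rs.length = (xs.filter PySem.Chars.isalnum).length) :
    reverse_alpha_fill (xs ++ ys) (rs ++ ss)
      = reverse_alpha_fill xs rs ++ reverse_alpha_fill ys ss := by
  induction xs generalizing rs with
  | nil =>
    cases rs with
    | nil => simp [reverse_alpha_fill]
    | cons r rs' => simp [List.filter] at h
  | cons c cs ih =>
    by_cases hc : PySem.Chars.isalnum c
    · simp [List.filter, hc] at h
      cases rs with
      | nil => simp at h
      | cons r rs' =>
        simp at h
        simp [reverse_alpha_fill, hc, ih rs' h]
    · simp [List.filter, hc] at h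
      simp [reverse_alpha_fill, hc, ih rs h]

lemma loop_eq (n : Nat) : ∀ (mid pre suf : List Char), mid.length = n →
    reverse_alpha_loop (pre ++ mid ++ suf) pre.length (pre.length + mid.length - 1)
      = pre ++ reverse_alpha_fill mid ((mid.filter PySem.Chars.isalnum).reverse) ++ suf := by
  induction n using Nat.strong_induction_on with
  | _ n ih =>
    intro mid pre suf hn
    match mid, hn with
    | [], _ =>
      rw [reverse_alpha_loop]
      simp [reverse_alpha_fill]
    | [c], _ =>
      have h1 : ¬ (pre.length < pre.length + ([c] : List Char).length - 1) := by simp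
      rw [reverse_alpha_loop, dif_neg h1]
      by_cases hc : PySem.Chars.isalnum c <;>
        simp [reverse_alpha_fill, List.filter, hc]
    | c :: e :: rest', hn =>
      obtain ⟨ms, d, hmd⟩ := (List.eq_nil_or_concat (e :: rest')).resolve_left (List.cons_ne_nil _ _)
      rw [List.concat_eq_append] at hmd
      have hn2 : n = ms.length + 2 := by
        have h := congrArg List.length hmd
        simp at h
        have h2 : (c :: e :: rest').length = n := hn
        simp at h2
        omega
      rw [show (c :: e :: rest' : List Char) = c :: (ms ++ [d]) from by rw [hmd]]
      have hik : pre.length < pre.length + (c :: (ms ++ [d])).length - 1 := by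
        simp only [List.length_cons, List.length_append, List.length_nil]; omega
      have hi : (pre ++ (c :: (ms ++ [d])) ++ suf)[pre.length]! = c := by
        rw [List.append_assoc]
        rw [getElem!_pos _ _ (by simp)]
        simp
      have hk : (pre ++ (c :: (ms ++ [d])) ++ suf)[pre.length + (c :: (ms ++ [d])).length - 1]! = d := by
        have hre : pre ++ (c :: (ms ++ [d])) ++ suf = (pre ++ c :: ms) ++ d :: suf := by simp
        have hkv : pre.length + (c :: (ms ++ [d])).length - 1 = (pre ++ c :: ms).length := by
          simp only [List.length_cons, List.length_append, List.length_nil]; omega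
        rw [hre, hkv, getElem!_pos _ _ (by simp)]
        simp
      rw [reverse_alpha_loop, dif_pos hik, hi, hk]
      by_cases hc : PySem.Chars.isalnum c
      · by_cases hd : PySem.Chars.isalnum d
        · -- swap both
          simp only [hc, hd, not_true_eq_false, if_false]
          have hset : ((pre ++ (c :: (ms ++ [d])) ++ suf).set pre.length d).set
              (pre.length + (c :: (ms ++ [d])).length - 1) c
              = pre ++ (d :: (ms ++ [c])) ++ suf := by
            have h1 : (pre ++ (c :: (ms ++ [d])) ++ suf).set pre.length d
                = pre ++ (d :: (ms ++ [d])) ++ suf := by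
              rw [List.append_assoc, List.set_append_right _ _ (le_refl _)]
              simp
            rw [h1]
            have hre : pre ++ (d :: (ms ++ [d])) ++ suf = (pre ++ d :: ms) ++ d :: suf := by simp
            have hkv : pre.length + (c :: (ms ++ [d])).length - 1 = (pre ++ d :: ms).length := by
              simp only [List.length_cons, List.length_append, List.length_nil]; omega
            rw [hre, hkv, List.set_append_right _ _ (le_refl _)]
            simp
          rw [hset]
          have harr : pre ++ (d :: (ms ++ [c])) ++ suf
              = (pre ++ [d]) ++ ms ++ ([c] ++ suf) := by simp
          have hIH := ih ms.length (by omega) ms (pre ++ [d]) ([c] ++ suf) rfl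
          have hi' : pre.length + 1 = (pre ++ [d]).length := by simp
          have hk' : pre.length + (c :: (ms ++ [d])).length - 1 - 1
              = (pre ++ [d]).length + ms.length - 1 := by simp only [List.length_cons, List.length_append, List.length_nil]; omega
          rw [harr, hi', hk', hIH]
          -- now compute the fill side
          have hfilter : ((c :: (ms ++ [d])).filter PySem.Chars.isalnum).reverse
              = d :: ((ms.filter PySem.Chars.isalnum).reverse ++ [c]) := by
            simp [List.filter_append, List.filter, hc, hd]
          rw [hfilter]
          show (pre ++ [d]) ++ _ ++ ([c] ++ suf)
              = pre ++ reverse_alpha_fill (c :: (ms ++ [d])) (d :: ((ms.filter PySem.Chars.isalnum).reverse ++ [c])) ++ suf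
          rw [show reverse_alpha_fill (c :: (ms ++ [d])) (d :: ((ms.filter PySem.Chars.isalnum).reverse ++ [c]))
              = d :: reverse_alpha_fill (ms ++ [d]) ((ms.filter PySem.Chars.isalnum).reverse ++ [c])
              from by simp [reverse_alpha_fill, hc]]
          rw [fill_append ms [d] _ [c] (by simp)]
          simp [reverse_alpha_fill, hd]
        · -- d not alnum: k -= 1
          simp only [hc, hd, not_true_eq_false, if_false]
          have harr : pre ++ (c :: (ms ++ [d])) ++ suf = pre ++ (c :: ms) ++ ([d] ++ suf) := by simp
          have hIH := ih (ms.length + 1) (by omega) (c :: ms) pre ([d] ++ suf) (by simp)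
          have hk' : pre.length + (c :: (ms ++ [d])).length - 1 - 1
              = pre.length + (c :: ms).length - 1 := by simp only [List.length_cons, List.length_append, List.length_nil]; omega
          rw [harr, hk', hIH]
          have hfilter : ((c :: (ms ++ [d])).filter PySem.Chars.isalnum).reverse
              = ((c :: ms).filter PySem.Chars.isalnum).reverse := by
            simp [List.filter_append, List.filter, hd]
          rw [hfilter]
          rw [show (c :: (ms ++ [d])) = (c :: ms) ++ [d] from by simp]
          rw [show ((c :: ms).filter PySem.Chars.isalnum).reverse
              = ((c :: ms).filter PySem.Chars.isalnum).reverse ++ ([] : List Char) from by simp]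
          rw [fill_append (c :: ms) [d] _ [] (by simp)]
          simp [reverse_alpha_fill, hd]
      · -- c not alnum: i += 1
        simp only [hc]
        have harr : pre ++ (c :: (ms ++ [d])) ++ suf = (pre ++ [c]) ++ (ms ++ [d]) ++ suf := by simp
        have hIH := ih (ms.length + 1) (by omega) (ms ++ [d]) (pre ++ [c]) suf (by simp)
        have hi' : pre.length + 1 = (pre ++ [c]).length := by simp
        have hk' : pre.length + (c :: (ms ++ [d])).length - 1
            = (pre ++ [c]).length + (ms ++ [d]).length - 1 := by simp only [List.length_cons, List.length_append, List.length_nil]; omega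
        rw [harr, hi', hk', hIH]
        have hfilter : ((c :: (ms ++ [d])).filter PySem.Chars.isalnum).reverse
            = (((ms ++ [d]).filter PySem.Chars.isalnum)).reverse := by
          simp [List.filter, hc]
        rw [hfilter]
        simp [reverse_alpha_fill, hc]

-- ===== VERDICT (by name: the statement is the Claim_ definition above) =====
theorem reverse_alpha_spec : Claim_equal_reverse_alpha := by
  intro s _
  unfold Spec_reverse_alpha reverse_alpha reverse_alpha_alt
  have h := loop_eq s.toList.length s.toList [] [] rfl
  simpa using congrArg String.ofList h
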